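-- pv_equiv track=rewrite | github.com/AndrewShepherd/leetcode-python | minimum-path-cost-in-grid.py/minimum_path_cost_in_grid.py | minPathCost
-- ===== SOURCE A (Python) =====
-- def minPathCost(grid, moveCost) -> int:
--     row_cost = grid[-1][:]
--     for row_index in range(len(grid)-2, -1, -1):
--         above_row_cost = grid[row_index][:]
--         for column_index in range(len(above_row_cost)):
--             move_cost_entry = moveCost[grid[row_index][column_index]]
--             travel_costs = [row_cost[ci] + move_cost_entry[ci] for ci in range(len(above_row_cost))]
--             travel_cost = min(travel_costs)
--             above_row_cost[column_index] += travel_cost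
--         row_cost = above_row_cost
--     return min(row_cost)
-- ===== SOURCE B (Python) =====
-- def minPathCost(grid, moveCost) -> int:
--     def best(rows):
--         first, rest = rows[0], rows[1:]
--         if not rest:
--             return list(first)
--         nxt = best(rest)
--         return [v + min(mc + n for mc, n in zip(moveCost[v], nxt)) for v in first]
--     return min(best(grid))
-- ===== Notes on version B (the rewrite author's own statement) =====
-- stated objective: alternative
-- what changed: B replaces A's bottom-up iterative DP (index loops mutating a copied row in place) by a top-down structural recursion over the list of rows that builds each row's best-cost vector with zip/min, never indexing or mutating.
-- outside the precondition, e.g. on minPathCost([[1], [5, 0]], [[0, 0], [0, 0]]): A returns 6, B returns 1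
import Mathlib
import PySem

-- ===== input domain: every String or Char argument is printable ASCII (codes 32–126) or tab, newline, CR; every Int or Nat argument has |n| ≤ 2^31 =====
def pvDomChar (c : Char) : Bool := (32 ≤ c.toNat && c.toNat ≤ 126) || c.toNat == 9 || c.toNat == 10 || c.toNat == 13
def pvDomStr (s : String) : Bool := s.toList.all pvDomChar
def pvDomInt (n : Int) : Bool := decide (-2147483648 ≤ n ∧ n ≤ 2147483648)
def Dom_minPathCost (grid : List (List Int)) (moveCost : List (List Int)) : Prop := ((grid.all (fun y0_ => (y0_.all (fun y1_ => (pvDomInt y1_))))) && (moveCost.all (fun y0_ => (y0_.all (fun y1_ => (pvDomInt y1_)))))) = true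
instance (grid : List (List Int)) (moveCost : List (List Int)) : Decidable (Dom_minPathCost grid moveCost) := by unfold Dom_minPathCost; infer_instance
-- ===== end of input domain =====

-- B replaces A's bottom-up index-loop DP (mutating a copied row in place) by a top-down
-- structural recursion over the list of rows built with zip/min; same asymptotic cost.

-- min(xs) for a list of ints; the 0 default is never reached inside Pre_ (rows are nonempty there)
def pyminI (xs : List Int) : Int := (PySem.List.min? xs (fun x => x)).getD 0

-- ===== PORT A =====
-- body of A's outer 'for row_index in range(len(grid)-2, -1, -1)' loop
def stepA (moveCost grid : List (List Int)) (row_cost : List Int) (row_index : Int) : List Int :=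
  (PySem.List.pyRange 0 (((PySem.List.pyGetD grid row_index []).length : Int)) 1).foldl
    (fun above ci =>
      let mce := PySem.List.pyGetD moveCost (PySem.List.pyGetD (PySem.List.pyGetD grid row_index []) ci 0) []
      let travel := pyminI ((PySem.List.pyRange 0 ((above.length : Int)) 1).map
        (fun c2 => PySem.List.pyGetD row_cost c2 0 + PySem.List.pyGetD mce c2 0))
      PySem.List.pySetD above ci (PySem.List.pyGetD above ci 0 + travel))
    (PySem.List.pyGetD grid row_index [])

def minPathCost (grid : List (List Int)) (moveCost : List (List Int)) : Int :=
  let row_cost := PySem.List.pyGetD grid (-1) []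
  pyminI ((PySem.List.pyRange ((grid.length : Int) - 2) (-1) (-1)).foldl (stepA moveCost grid) row_cost)

-- ===== PORT B =====
-- Source B's recursive helper 'best(rows)'
def bestAlt (moveCost : List (List Int)) : List (List Int) → List Int
  | [] => []
  | [first] => first
  | first :: next :: rest =>
      let nxt := bestAlt moveCost (next :: rest)
      first.map (fun v => v + pyminI (List.zipWith (fun mc nn => mc + nn) (PySem.List.pyGetD moveCost v []) nxt))

def minPathCost_alt (grid : List (List Int)) (moveCost : List (List Int)) : Int :=
  pyminI (bestAlt moveCost grid)

-- ===== PRECONDITION & SPEC =====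
-- Pre_ excludes exactly the inputs on which Python's A raises (empty grid, empty rows,
-- an above-row wider than the row below it, a grid value outside [-len(moveCost), len(moveCost)),
-- or a selected moveCost row shorter than the grid width), plus ragged grids with a narrower
-- upper row, where A returns a value that is an artefact of scanning only the upper row's width.
def Pre_minPathCost (grid : List (List Int)) (moveCost : List (List Int)) : Prop :=
  grid ≠ [] ∧
  0 < (grid.headD []).length ∧
  (∀ row ∈ grid, row.length = (grid.headD []).length) ∧
  (∀ row ∈ grid.dropLast, ∀ v ∈ row,
     (-(moveCost.length : Int) ≤ v ∧ v < (moveCost.length : Int)) ∧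
     (grid.headD []).length ≤ (PySem.List.pyGetD moveCost v []).length)

instance (grid : List (List Int)) (moveCost : List (List Int)) : Decidable (Pre_minPathCost grid moveCost) := by
  unfold Pre_minPathCost; infer_instance

def pvWitness_minPathCost : List (List Int) × List (List Int) := ([[1, 0], [4, 5]], [[1, 2], [3, 4]])

def Spec_minPathCost (grid : List (List Int)) (moveCost : List (List Int)) (out : Int) : Prop := out = minPathCost_alt grid moveCost
instance (grid : List (List Int)) (moveCost : List (List Int)) (out : Int) : Decidable (Spec_minPathCost grid moveCost out) := by unfold Spec_minPathCost; infer_instance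

-- ===== CLAIM (what is proved, stated in full; the proofs are below) =====
def Claim_equal_minPathCost : Prop := ∀ (grid : List (List Int)) (moveCost : List (List Int)), Dom_minPathCost grid moveCost → Pre_minPathCost grid moveCost → Spec_minPathCost grid moveCost (minPathCost grid moveCost)

-- ===== LEMMAS AND PROOFS =====

lemma travel_eq (rc mce : List Int) (n : Nat) (h1 : rc.length = n) (h2 : n ≤ mce.length) :
    (PySem.List.pyRange 0 (n : Int) 1).map
      (fun c2 => PySem.List.pyGetD rc c2 0 + PySem.List.pyGetD mce c2 0)
    = List.zipWith (fun mc nn => mc + nn) mce rc := by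
  subst h1
  apply List.ext_getElem
  · simp [PySem.List.length_pyRange_one]; omega
  · intro i hi1 hi2
    have hi : i < rc.length := by simpa [PySem.List.length_pyRange_one] using hi1
    simp only [List.getElem_map, PySem.List.getElem_pyRange_one, List.getElem_zipWith]
    have h0 : ((0:Int) + (i:Int)) = ((i:Nat):Int) := by ring
    rw [h0, PySem.List.pyGetD_natCast, PySem.List.pyGetD_natCast]
    rw [List.getD_eq_getElem _ _ hi, List.getD_eq_getElem _ _ (by omega)]
    ring
lemma inner_fold (l : List Int) (f : Nat → Int → Int) :
    ∀ (todo done cur : List Int), done ++ todo = l → cur.length = done.length →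
    (PySem.List.pyRange ((done.length : Int)) ((l.length : Int)) 1).foldl
      (fun above ci =>
        PySem.List.pySetD above ci
          (PySem.List.pyGetD above ci 0 + f above.length (PySem.List.pyGetD l ci 0)))
      (cur ++ todo)
    = cur ++ todo.map (fun x => x + f l.length x) := by
  intro todo
  induction todo with
  | nil =>
    intro done cur hdl hlen
    have h1 : done.length = l.length := by subst hdl; simp
    rw [h1, PySem.List.pyRange_one_eq_nil (le_refl _)]
    simp
  | cons x t ih =>
    intro done cur hdl hlen
    have hlt : (done.length : Int) < (l.length : Int) := by
      have : l.length = done.length + t.length + 1 := by subst hdl; simp; omega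
      omega
    rw [PySem.List.pyRange_one_cons hlt, List.foldl_cons]
    have hget : PySem.List.pyGetD (cur ++ x :: t) ((done.length : Int)) 0 = x := by
      rw [PySem.List.pyGetD_natCast, ← hlen]; simp
    have hgetl : PySem.List.pyGetD l ((done.length : Int)) 0 = x := by
      rw [PySem.List.pyGetD_natCast, ← hdl]; simp
    have hlenst : (cur ++ x :: t).length = l.length := by subst hdl; simp; omega
    have hset : PySem.List.pySetD (cur ++ x :: t) ((done.length : Int))
        (PySem.List.pyGetD (cur ++ x :: t) ((done.length : Int)) 0
          + f (cur ++ x :: t).length (PySem.List.pyGetD l ((done.length : Int)) 0))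
        = (cur ++ [x + f l.length x]) ++ t := by
      rw [hget, hgetl, hlenst, PySem.List.pySetD_natCast, ← hlen]
      simp
    rw [hset]
    have harg : ((done.length : Int) + 1) = (((done ++ [x]).length : Nat) : Int) := by simp
    rw [harg, ih (done ++ [x]) (cur ++ [x + f l.length x]) (by simp [← hdl]) (by simp [hlen])]
    simp
lemma bestAlt_length (moveCost : List (List Int)) (grid : List (List Int)) (h : grid ≠ []) :
    (bestAlt moveCost grid).length = (grid.headD []).length := by
  match grid with
  | [first] => simp [bestAlt]
  | first :: next :: rest => simp [bestAlt]
lemma stepA_succ (moveCost : List (List Int)) (r : List Int) (rest : List (List Int)) (s : List Int) (k : Nat) :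
    stepA moveCost (r :: rest) s (1 + (k : Int)) = stepA moveCost rest s ((k : Int)) := by
  have h : PySem.List.pyGetD (r :: rest) (1 + (k : Int)) ([] : List Int) = PySem.List.pyGetD rest ((k : Int)) [] := by
    have : (1 + (k : Int)) = (((k + 1 : Nat)) : Int) := by push_cast; ring
    rw [this, PySem.List.pyGetD_natCast, PySem.List.pyGetD_natCast]
    simp
  simp only [stepA, h]

lemma outer_eq (moveCost : List (List Int)) :
    ∀ (grid : List (List Int)), grid ≠ [] →
    (∀ row ∈ grid, row.length = (grid.headD []).length) →
    (∀ row ∈ grid.dropLast, ∀ v ∈ row,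
        (grid.headD []).length ≤ (PySem.List.pyGetD moveCost v []).length) →
    (PySem.List.pyRange ((grid.length : Int) - 2) (-1) (-1)).foldl (stepA moveCost grid)
        (PySem.List.pyGetD grid (-1) [])
      = bestAlt moveCost grid := by
  intro grid
  induction grid with
  | nil => intro h; exact absurd rfl h
  | cons first rest ih =>
    intro _ hrows hmc
    cases rest with
    | nil =>
      have h1 : ((([first] : List (List Int)).length : Int) - 2) = -1 := by simp
      rw [h1, PySem.List.pyRange_neg_one_eq_nil (le_refl _), List.foldl_nil]
      rw [PySem.List.pyGetD_neg_one [first] [] (by simp)]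
      simp [bestAlt]
    | cons next rest' =>
      -- abbreviations
      set R := next :: rest' with hR
      have hRne : R ≠ [] := by simp [hR]
      have hRlenpos : 0 < R.length := by simp [hR]
      -- init row
      have hinit : PySem.List.pyGetD (first :: R) (-1) ([] : List Int) = PySem.List.pyGetD R (-1) [] := by
        rw [PySem.List.pyGetD_neg_one (first :: R) [] (by simp), PySem.List.pyGetD_neg_one R [] hRne]
        exact List.getLast_cons hRne
      -- range of the grid fold
      have hrange : PySem.List.pyRange (((first :: R).length : Int) - 2) (-1) (-1)
          = (PySem.List.pyRange 1 (R.length : Int) 1).reverse ++ [0] := by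
        have h2 : (((first :: R).length : Int) - 2) = (R.length : Int) - 1 := by
          simp; omega
        rw [h2, PySem.List.pyRange_neg_one_eq_reverse]
        have h3 : ((-1 : Int) + 1) = 0 := by ring
        have h4 : ((R.length : Int) - 1 + 1) = (R.length : Int) := by ring
        rw [h3, h4, PySem.List.pyRange_one_cons (by exact_mod_cast hRlenpos), List.reverse_cons]
        norm_num
      rw [hrange, hinit, List.foldl_append, List.foldl_cons, List.foldl_nil]
      -- the prefix fold equals A's fold on R, which by ih equals bestAlt R
      have hih := ih hRne
        (by
          intro row hrow
          have h5 := hrows row (List.mem_cons_of_mem _ hrow)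
          have h6 := hrows next (by simp [hR])
          simp only [List.headD_cons] at h5 h6 ⊢
          rw [h5, ← h6]; simp [hR])
        (by
          intro row hrow v hv
          have hmem : row ∈ (first :: R).dropLast := by
            rw [hR, List.dropLast_cons₂]
            exact List.mem_cons_of_mem _ (by rw [← hR]; exact hrow)
          have h7 := hmc row hmem v hv
          have h6 := hrows next (by simp [hR])
          simp only [List.headD_cons] at h7 h6 ⊢
          rw [hR]; simp only [List.headD_cons]
          omega)
      have hrangeR : PySem.List.pyRange ((R.length : Int) - 2) (-1) (-1)
          = ((List.range ((R.length : Int) - 1).toNat).map (fun k : Nat => (0:Int) + (k:Int))).reverse := by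
        rw [PySem.List.pyRange_neg_one_eq_reverse]
        have h3 : ((-1 : Int) + 1) = 0 := by ring
        have h4 : ((R.length : Int) - 2 + 1) = (R.length : Int) - 1 := by ring
        rw [h3, h4, PySem.List.pyRange_one]
        norm_num
      rw [hrangeR, ← List.map_reverse, List.foldl_map] at hih
      have hpref : (PySem.List.pyRange 1 (R.length : Int) 1).reverse.foldl
            (stepA moveCost (first :: R)) (PySem.List.pyGetD R (-1) [])
          = bestAlt moveCost R := by
        rw [PySem.List.pyRange_one, ← List.map_reverse, List.foldl_map]
        have hfun : (fun (s : List Int) (k : Nat) => stepA moveCost (first :: R) s (1 + (k:Int)))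
            = (fun (s : List Int) (k : Nat) => stepA moveCost R s ((0:Int) + (k:Int))) := by
          funext s k
          rw [stepA_succ]
          norm_num
        rw [hfun]
        exact hih
      rw [hpref]
      -- the last step: stepA at row 0 on bestAlt R
      have hget0 : PySem.List.pyGetD (first :: R) (0 : Int) ([] : List Int) = first :=
        PySem.List.pyGetD_zero_cons first R []
      have hin := inner_fold first
        (fun len v => pyminI ((PySem.List.pyRange 0 ((len : Nat) : Int) 1).map
          (fun c2 => PySem.List.pyGetD (bestAlt moveCost R) c2 0
            + PySem.List.pyGetD (PySem.List.pyGetD moveCost v []) c2 0)))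
        first [] [] (by simp) (by simp)
      simp only [List.length_nil, Nat.cast_zero, List.nil_append] at hin
      have hstep0 : stepA moveCost (first :: R) (bestAlt moveCost R) 0
          = first.map (fun x => x + pyminI ((PySem.List.pyRange 0 ((first.length : Nat) : Int) 1).map
              (fun c2 => PySem.List.pyGetD (bestAlt moveCost R) c2 0
                + PySem.List.pyGetD (PySem.List.pyGetD moveCost x []) c2 0))) := by
        simp only [stepA, hget0]
        exact hin
      rw [hstep0]
      -- rewrite each element's travel as the zip of B
      have hfirstmem : first ∈ (first :: R).dropLast := by
        rw [hR, List.dropLast_cons₂]; exact List.mem_cons_self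
      have hrcn : (bestAlt moveCost R).length = first.length := by
        rw [bestAlt_length moveCost R hRne]
        have h6 := hrows next (by simp [hR])
        simp only [List.headD_cons] at h6
        simp [hR, h6]
      show _ = bestAlt moveCost (first :: next :: rest')
      simp only [bestAlt]
      apply List.map_congr_left
      intro x hx
      have h9 := hmc first hfirstmem x hx
      simp only [List.headD_cons] at h9
      rw [travel_eq (bestAlt moveCost R) (PySem.List.pyGetD moveCost x []) first.length hrcn h9]

-- ===== VERDICT (by name: the statement is the Claim_ definition above) =====
theorem minPathCost_spec : Claim_equal_minPathCost := by
  intro grid moveCost _hdom hpre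
  obtain ⟨hne, _hpos, hrows, hvals⟩ := hpre
  show minPathCost grid moveCost = minPathCost_alt grid moveCost
  simp only [minPathCost, minPathCost_alt]
  rw [outer_eq moveCost grid hne hrows (fun row hr v hv => (hvals row hr v hv).2)]
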